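-- pv_equiv track=rewrite | github.com/Bogat25/TescoPriceTracker | backend-api/recommendation_engine.py | rank_top_categories
-- ===== SOURCE A (Python) =====
-- def rank_top_categories(
--     alert_details: list[dict],
--     category_map: dict[str, str],
--     top_n: int = 5,
-- ) -> list[tuple[str, list[str]]]:
--     """Group alerted products by category and return the top N.
--
--     Primary sort:   number of alerted products in the category (DESC)
--     Secondary sort: most recent alert createdAt in the category (DESC)
--
--     Returns list of (category, [distinct_product_ids_in_category]).
--     """
--     groups: dict[str, dict] = {}
--     for alert in alert_details:
--         pid = alert.get("productId", "")
--         cat = category_map.get(pid, "")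
--         if not cat:
--             continue
--         if cat not in groups:
--             groups[cat] = {"product_ids": [], "latest": None}
--         if pid not in groups[cat]["product_ids"]:
--             groups[cat]["product_ids"].append(pid)
--         created_at = alert.get("createdAt")
--         if created_at and (
--             groups[cat]["latest"] is None or created_at > groups[cat]["latest"]
--         ):
--             groups[cat]["latest"] = created_at
--
--     ranked = sorted(
--         groups.items(),
--         key=lambda kv: (len(kv[1]["product_ids"]), kv[1]["latest"] or 0),
--         reverse=True,
--     )
--     return [(cat, data["product_ids"]) for cat, data in ranked[:top_n]]
-- ===== SOURCE B (Python) =====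
-- def rank_top_categories(
--     alert_details: list[dict],
--     category_map: dict[str, str],
--     top_n: int = 5,
-- ) -> list[tuple[str, list[str]]]:
--     """Two-pass rewrite: first collect every productId and createdAt per category,
--     then reduce each group (ordered-distinct ids, latest stamp) and rank."""
--     raw = {}
--     for alert in alert_details:
--         pid = alert.get("productId", "")
--         cat = category_map.get(pid, "")
--         if not cat:
--             continue
--         pids, stamps = raw.setdefault(cat, ([], []))
--         pids.append(pid)
--         stamps.append(alert.get("createdAt"))
--     reduced = [
--         (cat, list(dict.fromkeys(pids)), max((s for s in stamps if s), default=None))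
--         for cat, (pids, stamps) in raw.items()
--     ]
--     reduced.sort(key=lambda t: (len(t[1]), t[2] or 0), reverse=True)
--     return [(cat, ids) for cat, ids, _ in reduced[:top_n]]
-- ===== Notes on version B (the rewrite author's own statement) =====
-- stated objective: alternative
-- what changed: B replaces A's single incremental pass (per-alert membership test on the growing distinct-id list and running-max latest update inside one loop) by a collect-then-reduce decomposition: one pass appends every productId and createdAt to per-category raw lists, a separate reduce step computes dict.fromkeys-distinct ids and max of truthy stamps, then an in-place stable sort ranks the groups.
import Mathlib
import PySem

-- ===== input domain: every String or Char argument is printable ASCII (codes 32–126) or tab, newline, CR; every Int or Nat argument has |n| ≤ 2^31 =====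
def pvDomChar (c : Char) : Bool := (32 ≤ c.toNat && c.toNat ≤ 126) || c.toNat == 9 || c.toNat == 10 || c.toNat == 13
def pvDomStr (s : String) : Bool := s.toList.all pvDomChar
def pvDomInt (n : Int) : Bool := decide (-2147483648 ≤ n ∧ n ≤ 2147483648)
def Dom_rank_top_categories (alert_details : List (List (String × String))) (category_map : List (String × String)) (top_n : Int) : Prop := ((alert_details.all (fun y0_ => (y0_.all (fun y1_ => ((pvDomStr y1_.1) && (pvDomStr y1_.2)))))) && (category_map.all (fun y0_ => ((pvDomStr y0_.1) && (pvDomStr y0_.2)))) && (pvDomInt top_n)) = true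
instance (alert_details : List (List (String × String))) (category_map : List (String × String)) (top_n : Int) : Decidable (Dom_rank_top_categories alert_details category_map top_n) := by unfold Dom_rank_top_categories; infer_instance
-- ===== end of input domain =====

-- B re-implements A as a collect-then-reduce two-pass (raw per-category pid/stamp lists,
-- then dedup + max in a separate reduce step); equal return value on Pre_; A and B both
-- mutate nothing the caller observes.

-- ===== PORT A =====
-- one loop step of A's incremental grouping pass (kept as a named helper so the proofs can speak about it)
def pvStepA (category_map : List (String × String))
    (groups : PySem.Dict String (List String × Option String))
    (alert : List (String × String)) : PySem.Dict String (List String × Option String) :=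
  let pid := (PySem.Dict.mk alert).getD "productId" ""
  let cat := (PySem.Dict.mk category_map).getD pid ""
  if cat = "" then groups
  else
    let groups1 := if groups.contains cat then groups else groups.insert cat ([], none)
    let g := groups1.getD cat ([], none)
    let pids := if g.1.contains pid then g.1 else g.1 ++ [pid]
    let created := (PySem.Dict.mk alert).get? "createdAt"
    -- 'if created_at and (latest is None or created_at > latest)'
    let latest := match created with
      | none => g.2
      | some s => if s = "" then g.2
                  else match g.2 with
                       | none => some s
                       | some m => if m < s then some s else g.2
    groups1.insert cat (pids, latest)

def rank_top_categories (alert_details : List (List (String × String))) (category_map : List (String × String)) (top_n : Int) : List (String × List String) :=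
  let groups := alert_details.foldl (pvStepA category_map) PySem.Dict.empty
  -- key (len(...), latest or 0): 'latest or 0' ported as '.getD ""' — exact under Pre_ (keys never mix a None latest with a string one)
  let ranked := PySem.List.sorted2 groups.items
      (fun kv => (kv.2.1.length : Int)) (fun kv => kv.2.2.getD "") true
  (PySem.List.slice ranked none (some top_n)).map (fun p => (p.1, p.2.1))

-- ===== PORT B =====
-- one loop step of B's collect pass
def pvStepB (category_map : List (String × String))
    (raw : PySem.Dict String (List String × List (Option String)))
    (alert : List (String × String)) : PySem.Dict String (List String × List (Option String)) :=
  let pid := (PySem.Dict.mk alert).getD "productId" ""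
  let cat := (PySem.Dict.mk category_map).getD pid ""
  if cat = "" then raw
  else
    let e := raw.getD cat ([], [])
    raw.insert cat (e.1 ++ [pid], e.2 ++ [(PySem.Dict.mk alert).get? "createdAt"])

-- max((s for s in stamps if s), default=None)
def pvMaxStamp (stamps : List (Option String)) : Option String :=
  PySem.List.max? ((stamps.filterMap (fun o => o)).filter (fun s => !(s == ""))) (fun s => s)

-- B's reduce step: (cat, list(dict.fromkeys(pids)), max of truthy stamps)
def pvReduce (kv : String × List String × List (Option String)) : String × List String × Option String :=
  (kv.1, PySem.List.dedup kv.2.1, pvMaxStamp kv.2.2)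

def rank_top_categories_alt (alert_details : List (List (String × String))) (category_map : List (String × String)) (top_n : Int) : List (String × List String) :=
  let raw := alert_details.foldl (pvStepB category_map) PySem.Dict.empty
  let reduced := raw.items.map pvReduce
  let ranked := PySem.List.sorted2 reduced
      (fun t => (t.2.1.length : Int)) (fun t => t.2.2.getD "") true
  (PySem.List.slice ranked none (some top_n)).map (fun t => (t.1, t.2.1))

-- ===== PRECONDITION & SPEC =====
def pvCatOf (category_map : List (String × String)) (alert : List (String × String)) : String :=
  (PySem.Dict.mk category_map).getD ((PySem.Dict.mk alert).getD "productId" "") ""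
def pvStampOf (alert : List (String × String)) : String :=
  (PySem.Dict.mk alert).getD "createdAt" ""
-- Pre_ excludes inputs whose per-category sort keys mix a missing latest (int 0) with string
-- timestamps across groups: there Python's sorted() compares int with str and raises TypeError
-- whenever Timsort happens to compare two such tied groups (whether A returns at all depends on
-- that comparison schedule, not on the data).
def Pre_rank_top_categories (alert_details : List (List (String × String))) (category_map : List (String × String)) (top_n : Int) : Prop :=
  (∀ a ∈ alert_details, pvCatOf category_map a ≠ "" →
      ∃ b ∈ alert_details, pvCatOf category_map b = pvCatOf category_map a ∧ pvStampOf b ≠ "")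
  ∨ (∀ a ∈ alert_details, pvCatOf category_map a = "" ∨ pvStampOf a = "")
instance (alert_details : List (List (String × String))) (category_map : List (String × String)) (top_n : Int) : Decidable (Pre_rank_top_categories alert_details category_map top_n) := by unfold Pre_rank_top_categories; infer_instance

def pvWitness_rank_top_categories : (List (List (String × String))) × (List (String × String)) × Int :=
  ([[("productId", "p1"), ("createdAt", "2024-01-01")], [("productId", "p2")], [("productId", "p2"), ("createdAt", "2024-02-02")]],
   [("p1", "Bakery"), ("p2", "Dairy")], 5)

def Spec_rank_top_categories (alert_details : List (List (String × String))) (category_map : List (String × String)) (top_n : Int) (out : List (String × List String)) : Prop := out = rank_top_categories_alt alert_details category_map top_n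
instance (alert_details : List (List (String × String))) (category_map : List (String × String)) (top_n : Int) (out : List (String × List String)) : Decidable (Spec_rank_top_categories alert_details category_map top_n out) := by unfold Spec_rank_top_categories; infer_instance

-- ===== CLAIM (what is proved, stated in full; the proofs are below) =====
def Claim_equal_rank_top_categories : Prop := ∀ (alert_details : List (List (String × String))) (category_map : List (String × String)) (top_n : Int), Dom_rank_top_categories alert_details category_map top_n → Pre_rank_top_categories alert_details category_map top_n → Spec_rank_top_categories alert_details category_map top_n (rank_top_categories alert_details category_map top_n)

-- ===== LEMMAS AND PROOFS =====

-- dict.fromkeys of a snoc is PySem.Set.add of the dedup so far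
theorem pv_dedup_snoc (l : List String) (x : String) :
    PySem.List.dedup (l ++ [x]) =
      if (PySem.List.dedup l).contains x then PySem.List.dedup l
      else PySem.List.dedup l ++ [x] := by
  simp [PySem.List.dedup_eq_ofList, PySem.Set.ofList_eq_foldl, List.foldl_append,
    PySem.Set.add, PySem.Set.contains]

theorem pv_max?_snoc (l : List String) (x : String) :
    PySem.List.max? (l ++ [x]) (fun s => s) =
      match PySem.List.max? l (fun s => s) with
      | none => some x
      | some m => if m < x then some x else some m := by
  cases l with
  | nil =>
      rw [List.nil_append,
        show PySem.List.max? ([] : List String) (fun s => s) = none from rfl,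
        PySem.List.max?_id_cons]
      rfl
  | cons h t =>
      rw [List.cons_append, PySem.List.max?_id_cons, PySem.List.max?_id_cons, List.foldl_append]
      simp only [List.foldl]
      rcases lt_trichotomy (t.foldl max h) x with hc | hc | hc
      · simp [max_eq_right hc.le, hc]
      · simp [hc, max_self]
      · simp [max_eq_left hc.le, not_lt.2 hc.le]

-- B's reduce of a group extended by one alert = A's incremental update of the reduced group
theorem pv_maxStamp_snoc (ss : List (Option String)) (o : Option String) :
    pvMaxStamp (ss ++ [o]) =
      match o with
      | none => pvMaxStamp ss
      | some s => if s = "" then pvMaxStamp ss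
                  else match pvMaxStamp ss with
                       | none => some s
                       | some m => if m < s then some s else pvMaxStamp ss := by
  unfold pvMaxStamp
  cases o with
  | none => simp
  | some s =>
      by_cases hs : s = ""
      · simp [hs]
      · rw [List.filterMap_append, List.filter_append]
        simp only [List.filterMap_cons, List.filterMap_nil, List.filter_cons, List.filter_nil,
          Bool.not_eq_true', beq_eq_false_iff_ne, ne_eq, hs, not_false_iff, if_pos]
        rw [pv_max?_snoc]
        cases hm : PySem.List.max?
            ((ss.filterMap (fun o => o)).filter (fun s => !(s == ""))) (fun s => s) <;> simp

theorem pv_step_rel (category_map alert : List (String × String))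
    (dB : PySem.Dict String (List String × List (Option String)))
    (dA : PySem.Dict String (List String × Option String))
    (hnd : dB.keys.Nodup) (hrel : dA.items = dB.items.map pvReduce) :
    (pvStepA category_map dA alert).items = (pvStepB category_map dB alert).items.map pvReduce := by
  have hkeys : dA.keys = dB.keys := by
    simp only [PySem.Dict.keys, hrel, List.map_map]
    rfl
  have hndA : dA.keys.Nodup := hkeys ▸ hnd
  unfold pvStepA pvStepB
  dsimp only
  set pid := (PySem.Dict.mk alert).getD "productId" "" with hpid
  set cat := (PySem.Dict.mk category_map).getD pid "" with hcat
  set created := (PySem.Dict.mk alert).get? "createdAt" with hcreated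
  by_cases hc : cat = ""
  · simp [hc, hrel]
  · simp only [if_neg hc]
    have hcont : dA.contains cat = dB.contains cat := by
      rw [PySem.Dict.contains_eq_decide_mem_keys, PySem.Dict.contains_eq_decide_mem_keys, hkeys]
    by_cases hB : dB.contains cat = true
    · -- the category already has a group
      have hA : dA.contains cat = true := by rw [hcont]; exact hB
      obtain ⟨e, he⟩ : ∃ e, dB.get? cat = some e := by
        rw [PySem.Dict.contains_eq_isSome_get?] at hB
        exact Option.isSome_iff_exists.mp hB
      have heB : dB.getD cat ([], []) = e := PySem.Dict.getD_of_get?_eq_some dB ([], []) he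
      have hmemA : (cat, PySem.List.dedup e.1, pvMaxStamp e.2) ∈ dA.items := by
        rw [hrel]
        exact List.mem_map.mpr ⟨(cat, e), PySem.Dict.mem_items_of_get?_eq_some dB he, rfl⟩
      have heA : dA.getD cat ([], none) = (PySem.List.dedup e.1, pvMaxStamp e.2) :=
        PySem.Dict.getD_of_mem_items dA hmemA hndA ([], none)
      rw [if_pos hA, heA, heB,
        PySem.Dict.items_insert_of_contains dA _ hA,
        PySem.Dict.items_insert_of_contains dB _ hB, hrel, List.map_map, List.map_map]
      refine List.map_congr_left ?_
      intro p _
      by_cases hpc : (p.1 == cat) = true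
      · simp only [Function.comp_apply, pvReduce, hpc, if_pos]
        rw [pv_dedup_snoc, pv_maxStamp_snoc]
      · simp only [Function.comp_apply, pvReduce, hpc, if_neg, Bool.false_eq_true,
          not_false_iff]
    · -- fresh category
      have hB' : dB.contains cat = false := by simpa using hB
      have hA' : dA.contains cat = false := by rw [hcont]; exact hB'
      rw [if_neg (by simp [hA']), PySem.Dict.getD_insert_self, PySem.Dict.insert_insert_self,
        PySem.Dict.getD_of_not_contains dB ([], []) hB',
        PySem.Dict.items_insert_of_not_contains dA _ hA',
        PySem.Dict.items_insert_of_not_contains dB _ hB', List.map_append, hrel]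
      congr 1
      simp only [List.map_cons, List.map_nil, pvReduce, List.nil_append]
      have h1 : PySem.List.dedup [pid] = [pid] := rfl
      cases created with
      | none =>
          simp [pvMaxStamp]
          exact ⟨rfl, rfl⟩
      | some s =>
          by_cases hs : s = ""
          · simp [hs, pvMaxStamp]
            exact ⟨rfl, rfl⟩
          · simp [hs, pvMaxStamp, PySem.List.max?_id_cons]
            exact rfl

theorem pv_stepB_nodup (category_map alert : List (String × String))
    (dB : PySem.Dict String (List String × List (Option String)))
    (hnd : dB.keys.Nodup) : (pvStepB category_map dB alert).keys.Nodup := by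
  unfold pvStepB
  dsimp only
  split
  · exact hnd
  · exact PySem.Dict.nodup_keys_insert _ _ _ hnd

theorem pv_items_rel (category_map : List (String × String)) (ad : List (List (String × String))) :
    ∀ (dB : PySem.Dict String (List String × List (Option String)))
      (dA : PySem.Dict String (List String × Option String)),
      dB.keys.Nodup → dA.items = dB.items.map pvReduce →
      (ad.foldl (pvStepA category_map) dA).items
        = ((ad.foldl (pvStepB category_map) dB).items).map pvReduce := by
  induction ad with
  | nil => intro dB dA hnd hrel; simpa using hrel
  | cons a t ih =>
      intro dB dA hnd hrel
      simp only [List.foldl_cons]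
      exact ih _ _ (pv_stepB_nodup category_map a dB hnd) (pv_step_rel category_map a dB dA hnd hrel)

-- ===== VERDICT (by name: the statement is the Claim_ definition above) =====
theorem rank_top_categories_spec : Claim_equal_rank_top_categories := by
  intro ad cm tn _ _
  unfold Spec_rank_top_categories rank_top_categories rank_top_categories_alt
  dsimp only
  rw [pv_items_rel cm ad PySem.Dict.empty PySem.Dict.empty PySem.Dict.nodup_keys_empty rfl]
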